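-- pv_equiv track=rewrite | github.com/vnguyen01/CS287 | HW2/preprocess.py | gen_dictionary
-- ===== SOURCE A (Python) =====
-- import collections
--
-- def is_float(c):
--     if c.isdigit():
--         return True
--     if c == ',':
--         return True
--     return False
--
-- def word_process(word):
--     #Realized that this can be done much easier with regular expresions...
--     #Removes digits and replaces them with the string 'NUMBER'
--     flag = 0
--     interval = [0,0]
--     intervals = []
--     processed = ''
--     if len(word) == 1 and (not word.isdigit()):
--         return word
--     for i in range(0,len(word)):
--         if flag == 0:
--             if is_float(word[i]):
--                 flag = 1
--                 interval[0] = i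
--                 #if len(word) == 1:
--                     #intervals.append((0,0))
--                 if i == len(word)-1:
--                     intervals.append((interval[0], interval[0]+1))
--         else:
--             if (not is_float(word[i])):
--                 flag = 0
--                 interval[1] = i-1
--                 intervals.append((interval[0],interval[1]))
--             elif i == len(word) -1:
--                 interval[1] = i
--                 intervals.append((interval[0],interval[1]))
--
--     index = 0
--     for pair in intervals:
--         prefix = word[index:pair[0]]
--         index = pair[1]+1
--         processed = processed + prefix + 'NUMBER'
--
--     processed = processed + word[index:]
--     return processed
--
-- def gen_dictionary(data):
--     vocab_list = []
--     for data_set in data: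
--         vocab_list.extend([(word_process(word[2].lower())) for word in data_set if word != []])
--     d = collections.defaultdict(list)
--     counter = 2
--
--     for word in vocab_list:
--         if not d[word]:
--             d[word] = counter
--             counter = counter + 1
--     d['PADDING'] = 0
--     d['RARE'] = 1
--     return d
-- ===== SOURCE B (Python) =====
-- from itertools import groupby
--
--
-- def is_float(c):
--     if c.isdigit():
--         return True
--     if c == ',':
--         return True
--     return False
--
--
-- def word_process(word):
--     # groupby over consecutive runs keyed by is_float; runs of digit/comma
--     # characters become 'NUMBER', other runs are kept verbatim.
--     if len(word) == 1 and (not word.isdigit()):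
--         return word
--     return ''.join('NUMBER' if key else ''.join(group)
--                    for key, group in groupby(word, key=is_float))
--
--
-- def gen_dictionary(data):
--     # single fused pass: no intermediate vocab_list, plain dict membership
--     d = {}
--     counter = 2
--     for data_set in data:
--         for word in data_set:
--             if word:
--                 w = word_process(word[2].lower())
--                 if w not in d:
--                     d[w] = counter
--                     counter += 1
--     d['PADDING'] = 0
--     d['RARE'] = 1
--     return d
-- ===== Notes on version B (the rewrite author's own statement) =====
-- stated objective: simpler
-- what changed: word_process's index/interval two-pass machinery (flag state machine collecting (start,end) pairs, then a slice-and-splice reassembly) is replaced by a single itertools.groupby over runs keyed by is_float joined directly, and gen_dictionary's vocab_list-then-dedup two-phase loop is fused into one pass over the data with a plain dict membership test.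
import Mathlib
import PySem

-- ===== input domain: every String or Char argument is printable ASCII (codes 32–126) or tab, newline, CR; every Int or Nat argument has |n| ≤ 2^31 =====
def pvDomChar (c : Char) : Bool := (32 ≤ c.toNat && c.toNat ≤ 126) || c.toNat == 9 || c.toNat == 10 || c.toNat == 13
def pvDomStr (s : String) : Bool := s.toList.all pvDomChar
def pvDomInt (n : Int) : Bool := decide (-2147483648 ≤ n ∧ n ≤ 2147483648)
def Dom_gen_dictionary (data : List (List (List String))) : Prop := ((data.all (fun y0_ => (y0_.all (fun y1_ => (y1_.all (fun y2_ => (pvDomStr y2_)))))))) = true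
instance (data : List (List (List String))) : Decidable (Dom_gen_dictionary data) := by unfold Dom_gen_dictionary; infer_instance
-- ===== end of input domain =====

-- B replaces A's two-pass index/interval machinery in word_process with an itertools.groupby
-- over runs keyed by is_float, and fuses gen_dictionary's vocab_list + dedup passes into one
-- loop (objective: simpler; same behaviour on Pre_, where word[2] exists).

-- ===== PORT A =====

-- is_float(c) on a single character
def pvIsFloat (c : Char) : Bool :=
  if PySem.Chars.isdigit c then true else if c = ',' then true else false

def pvNUMBER : List Char := "NUMBER".toList

-- the `for i in range(0, len(word))` loop of word_process, structurally over the remaining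
-- characters; i is the current index, n = len(word), flag/i0/acc are the mutated state
-- (interval[0] = i0; interval[1] is written and read in the same iteration).
-- Python's `i-1` in the flag==1 branch is Nat subtraction here; that branch only runs with i ≥ 1.
def pvLoopA : List Char → Nat → Nat → Nat → Nat → List (Nat × Nat) → List (Nat × Nat)
  | [], _, _, _, _, acc => acc
  | c :: r, n, i, flag, i0, acc =>
    if flag = 0 then
      if pvIsFloat c then
        pvLoopA r n (i+1) 1 i (if i = n - 1 then acc ++ [(i, i+1)] else acc)
      else pvLoopA r n (i+1) 0 i0 acc
    else
      if !pvIsFloat c then pvLoopA r n (i+1) 0 i0 (acc ++ [(i0, i-1)])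
      else if i = n - 1 then pvLoopA r n (i+1) 1 i0 (acc ++ [(i0, i)])
      else pvLoopA r n (i+1) 1 i0 acc

-- the second loop: processed += word[index:a] + 'NUMBER'; index = b+1; finally + word[index:]
-- (word[x:y] for the nonnegative indices used here is take (y-x) ∘ drop x, exact incl. clamping).
def pvBuildA (w : List Char) : List (Nat × Nat) → Nat → List Char → List Char
  | [], idx, processed => processed ++ w.drop idx
  | (a, b) :: rest, idx, processed =>
      pvBuildA w rest (b + 1) (processed ++ ((w.drop idx).take (a - idx)) ++ pvNUMBER)

def pvWordProcessA (s : String) : String :=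
  if s.toList.length = 1 ∧ ¬ PySem.Str.strIsdigit s then s
  else String.ofList (pvBuildA s.toList (pvLoopA s.toList s.toList.length 0 0 0 []) 0 [])

-- `if not d[word]` on defaultdict(list): a fresh key yields [] (falsy), an assigned counter
-- (always ≥ 2) is truthy — so the branch fires exactly when the key is absent.
def pvStepA (dc : PySem.Dict String Int × Int) (word : String) : PySem.Dict String Int × Int :=
  if (dc.1.get? word).isNone then (dc.1.insert word dc.2, dc.2 + 1) else dc

def gen_dictionary (data : List (List (List String))) : List (String × Int) :=
  (((data.foldl
      (fun acc ds => acc ++ (ds.filter (fun w => !w.isEmpty)).map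
        (fun w => pvWordProcessA (PySem.Str.lower ((PySem.List.pyGet? w 2).getD ""))))
      []).foldl pvStepA (PySem.Dict.empty, 2)).1.insert "PADDING" 0).insert "RARE" 1 |>.items

-- ===== PORT B =====

-- itertools.groupby(word, key=is_float): consecutive runs with their key
def pvGroupRuns : List Char → List (Bool × List Char)
  | [] => []
  | c :: r =>
    (pvIsFloat c, c :: r.takeWhile (fun x => pvIsFloat x == pvIsFloat c)) ::
      pvGroupRuns (r.dropWhile (fun x => pvIsFloat x == pvIsFloat c))
  termination_by cs => cs.length
  decreasing_by
    simpa using Nat.lt_succ_of_le (List.length_dropWhile_le _ r)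

def pvWordProcessB (s : String) : String :=
  if s.toList.length = 1 ∧ ¬ PySem.Str.strIsdigit s then s
  else String.ofList ((pvGroupRuns s.toList).flatMap (fun kg => if kg.1 then pvNUMBER else kg.2))

-- (the local variable `word` of Source B's loop body is inlined)
def pvStepB (dc : PySem.Dict String Int × Int) (w : List String) : PySem.Dict String Int × Int :=
  if w.isEmpty then dc
  else if dc.1.contains (pvWordProcessB (PySem.Str.lower ((PySem.List.pyGet? w 2).getD ""))) then dc
  else (dc.1.insert (pvWordProcessB (PySem.Str.lower ((PySem.List.pyGet? w 2).getD ""))) dc.2, dc.2 + 1)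

def gen_dictionary_alt (data : List (List (List String))) : List (String × Int) :=
  (((data.foldl (fun dc ds => ds.foldl pvStepB dc) (PySem.Dict.empty, 2)).1.insert "PADDING" 0).insert
    "RARE" 1).items

-- ===== PRECONDITION & SPEC =====
-- Pre_ excludes exactly the inputs where Python A raises IndexError: a nonempty inner list
-- with fewer than 3 elements makes word[2] fail.
def Pre_gen_dictionary (data : List (List (List String))) : Prop :=
  ∀ ds ∈ data, ∀ w ∈ ds, w = [] ∨ 3 ≤ w.length
instance (data : List (List (List String))) : Decidable (Pre_gen_dictionary data) := by
  unfold Pre_gen_dictionary; infer_instance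

def pvWitness_gen_dictionary : List (List (List String)) :=
  [[["a", "b", "x12"], []], [["q", "r", "7"]]]

def Spec_gen_dictionary (data : List (List (List String))) (out : List (String × Int)) : Prop := out = gen_dictionary_alt data
instance (data : List (List (List String))) (out : List (String × Int)) : Decidable (Spec_gen_dictionary data out) := by unfold Spec_gen_dictionary; infer_instance

-- ===== CLAIM (what is proved, stated in full; the proofs are below) =====
def Claim_equal_gen_dictionary : Prop := ∀ (data : List (List (List String))), Dom_gen_dictionary data → Pre_gen_dictionary data → Spec_gen_dictionary data (gen_dictionary data)

-- ===== LEMMAS AND PROOFS =====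

-- the canonical one-pass state machine both word_process variants compute
def pvRender : Bool → List Char → List Char
  | _, [] => []
  | inRun, c :: r =>
    if pvIsFloat c then
      (if inRun then pvRender true r else pvNUMBER ++ pvRender true r)
    else c :: pvRender false r

-- branch equations of pvLoopA for the two concrete flag values
theorem pvLoopA_nil (n i flag i0 : Nat) (acc : List (Nat × Nat)) :
    pvLoopA [] n i flag i0 acc = acc := rfl

theorem pvLoopA_f0_float_last {c : Char} (r : List Char) {n i : Nat} (i0 : Nat)
    (acc : List (Nat × Nat)) (hf : pvIsFloat c = true) (hn : i = n - 1) :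
    pvLoopA (c :: r) n i 0 i0 acc = pvLoopA r n (i+1) 1 i (acc ++ [(i, i+1)]) := by
  simp [pvLoopA, hf, hn]

theorem pvLoopA_f0_float_mid {c : Char} (r : List Char) {n i : Nat} (i0 : Nat)
    (acc : List (Nat × Nat)) (hf : pvIsFloat c = true) (hn : ¬ i = n - 1) :
    pvLoopA (c :: r) n i 0 i0 acc = pvLoopA r n (i+1) 1 i acc := by
  simp [pvLoopA, hf, hn]

theorem pvLoopA_f0_nonfloat {c : Char} (r : List Char) {n i : Nat} (i0 : Nat)
    (acc : List (Nat × Nat)) (hf : ¬ pvIsFloat c = true) :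
    pvLoopA (c :: r) n i 0 i0 acc = pvLoopA r n (i+1) 0 i0 acc := by
  simp [pvLoopA, hf]

theorem pvLoopA_f1_nonfloat {c : Char} (r : List Char) {n i : Nat} (i0 : Nat)
    (acc : List (Nat × Nat)) (hf : ¬ pvIsFloat c = true) :
    pvLoopA (c :: r) n i 1 i0 acc = pvLoopA r n (i+1) 0 i0 (acc ++ [(i0, i-1)]) := by
  simp [pvLoopA, hf]

theorem pvLoopA_f1_float_last {c : Char} (r : List Char) {n i : Nat} (i0 : Nat)
    (acc : List (Nat × Nat)) (hf : pvIsFloat c = true) (hn : i = n - 1) :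
    pvLoopA (c :: r) n i 1 i0 acc = pvLoopA r n (i+1) 1 i0 (acc ++ [(i0, i)]) := by
  simp [pvLoopA, hf, hn]

theorem pvLoopA_f1_float_mid {c : Char} (r : List Char) {n i : Nat} (i0 : Nat)
    (acc : List (Nat × Nat)) (hf : pvIsFloat c = true) (hn : ¬ i = n - 1) :
    pvLoopA (c :: r) n i 1 i0 acc = pvLoopA r n (i+1) 1 i0 acc := by
  simp [pvLoopA, hf, hn]

theorem pvLoopA_acc (r : List Char) : ∀ n i flag i0 acc,
    pvLoopA r n i flag i0 acc = acc ++ pvLoopA r n i flag i0 [] := by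
  induction r with
  | nil => intro n i flag i0 acc; simp [pvLoopA]
  | cons c r ih =>
    intro n i flag i0 acc
    simp only [pvLoopA]
    split_ifs <;>
      first
      | rw [ih _ _ _ _ (acc ++ _), ih _ _ _ _ ([] ++ _)] <;> simp
      | rw [ih _ _ _ _ acc]

theorem pvBuildA_acc (w : List Char) : ∀ ps idx proc,
    pvBuildA w ps idx proc = proc ++ pvBuildA w ps idx [] := by
  intro ps
  induction ps with
  | nil => intro idx proc; simp [pvBuildA]
  | cons p rest ih =>
    intro idx proc
    obtain ⟨a, b⟩ := p
    simp only [pvBuildA]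
    rw [ih]
    conv_rhs => rw [ih]
    simp

theorem pvBuildA_cons_eq (w : List Char) (a b : Nat) (rest : List (Nat × Nat)) (idx : Nat)
    (proc : List Char) :
    pvBuildA w ((a, b) :: rest) idx proc =
      proc ++ ((w.drop idx).take (a - idx) ++ (pvNUMBER ++ pvBuildA w rest (b + 1) [])) := by
  simp only [pvBuildA]
  rw [pvBuildA_acc]
  simp

-- every interval produced with flag=0 starts at ≥ i; with flag=1 at ≥ i0
theorem pvLoopA_head_ge (r : List Char) : ∀ n i i0 a b l,
    (pvLoopA r n i 0 i0 [] = (a, b) :: l → i ≤ a) ∧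
    (i0 ≤ i → pvLoopA r n i 1 i0 [] = (a, b) :: l → i0 ≤ a) := by
  induction r with
  | nil => intro n i i0 a b l; simp [pvLoopA]
  | cons c r ih =>
    intro n i i0 a b l
    constructor
    · intro h
      by_cases hf : pvIsFloat c
      · by_cases hn : i = n - 1
        · rw [pvLoopA_f0_float_last r i0 [] hf hn, pvLoopA_acc] at h
          simp only [List.nil_append, List.cons_append, List.cons.injEq, Prod.mk.injEq] at h
          omega
        · rw [pvLoopA_f0_float_mid r i0 [] hf hn] at h
          exact le_trans (by omega) ((ih n (i+1) i a b l).2 (by omega) h)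
      · rw [pvLoopA_f0_nonfloat r i0 [] hf] at h
        exact le_trans (by omega) ((ih n (i+1) i0 a b l).1 h)
    · intro hi h
      by_cases hf : pvIsFloat c
      · by_cases hn : i = n - 1
        · rw [pvLoopA_f1_float_last r i0 [] hf hn, pvLoopA_acc] at h
          simp only [List.nil_append, List.cons_append, List.cons.injEq, Prod.mk.injEq] at h
          omega
        · rw [pvLoopA_f1_float_mid r i0 [] hf hn] at h
          exact (ih n (i+1) i0 a b l).2 (by omega) h
      · rw [pvLoopA_f1_nonfloat r i0 [] hf, pvLoopA_acc] at h
        simp only [List.nil_append, List.cons_append, List.cons.injEq, Prod.mk.injEq] at h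
        omega

theorem pvBuildA_cons (w : List Char) (c : Char) (tl : List Char) (ps : List (Nat × Nat))
    (idx : Nat) (hd : w.drop idx = c :: tl)
    (hps : ps = [] ∨ ∃ a b l, ps = (a, b) :: l ∧ idx < a) :
    pvBuildA w ps idx [] = c :: pvBuildA w ps (idx + 1) [] := by
  have htl : w.drop (idx + 1) = tl := by
    rw [← List.drop_drop (j := idx) (i := 1), hd]
    simp
  rcases hps with h | ⟨a, b, l, rfl, ha⟩
  · subst h
    simp [pvBuildA, hd, htl]
  · rw [pvBuildA_cons_eq, pvBuildA_cons_eq]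
    have hsub : a - idx = (a - (idx + 1)) + 1 := by omega
    rw [hd, htl, hsub]
    simp [List.take_succ_cons]

-- main invariant: loop + build over the suffix w.drop i equals the state machine
theorem pvMainA (w : List Char) : ∀ (r : List Char) (i i0 : Nat), r = w.drop i →
    (pvBuildA w (pvLoopA r w.length i 0 i0 []) i [] = pvRender false r) ∧
    (r ≠ [] → i0 < i → pvBuildA w (pvLoopA r w.length i 1 i0 []) i0 [] = pvNUMBER ++ pvRender true r) := by
  intro r
  induction r with
  | nil =>
    intro i i0 hr
    refine ⟨?_, by tauto⟩
    simp [pvLoopA, pvBuildA, pvRender, ← hr]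
  | cons c rt ih =>
    intro i i0 hr
    have h1 : rt.length + 1 = w.length - i := by
      have h2 := congrArg List.length hr
      simpa using h2
    have hrt : rt = w.drop (i + 1) := by
      rw [← List.drop_drop (j := i) (i := 1), ← hr]
      simp
    have hlast : (i = w.length - 1) ↔ rt = [] := by
      rw [← List.length_eq_zero_iff]; omega
    constructor
    · -- flag = 0
      by_cases hf : pvIsFloat c
      · by_cases hn : i = w.length - 1
        · -- last char, special (i, i+1) interval
          have hrt0 : rt = [] := hlast.mp hn
          subst hrt0
          rw [pvLoopA_f0_float_last [] i0 [] hf hn, pvLoopA_nil]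
          have hd2 : w.drop (i + 2) = [] := by
            rw [← List.drop_drop (j := i + 1) (i := 1), ← hrt]
            simp
          rw [List.nil_append, pvBuildA_cons_eq]
          simp [pvBuildA, pvRender, hf, hd2, show i + 1 + 1 = i + 2 from rfl]
        · rw [pvLoopA_f0_float_mid rt i0 [] hf hn]
          have hrtne : rt ≠ [] := fun h => hn (hlast.mpr h)
          rw [(ih (i+1) i hrt).2 hrtne (by omega)]
          simp [pvRender, hf]
      · rw [pvLoopA_f0_nonfloat rt i0 [] hf]
        rw [pvBuildA_cons w c rt _ i hr.symm]
        · rw [(ih (i+1) i0 hrt).1]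
          simp [pvRender, hf]
        · rcases hps : pvLoopA rt w.length (i+1) 0 i0 [] with _ | ⟨⟨a, b⟩, l⟩
          · exact Or.inl rfl
          · exact Or.inr ⟨a, b, l, rfl, by
              have := (pvLoopA_head_ge rt w.length (i+1) i0 a b l).1 hps
              omega⟩
    · -- flag = 1
      intro _ hi0
      by_cases hf : pvIsFloat c
      · by_cases hn : i = w.length - 1
        · have hrt0 : rt = [] := hlast.mp hn
          subst hrt0
          rw [pvLoopA_f1_float_last [] i0 [] hf hn, pvLoopA_nil]
          have hd1 : w.drop (i + 1) = [] := hrt.symm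
          rw [List.nil_append, pvBuildA_cons_eq]
          simp [pvBuildA, pvRender, hf, hd1]
        · rw [pvLoopA_f1_float_mid rt i0 [] hf hn]
          have hrtne : rt ≠ [] := fun h => hn (hlast.mpr h)
          rw [(ih (i+1) i0 hrt).2 hrtne (by omega)]
          simp [pvRender, hf]
      · rw [pvLoopA_f1_nonfloat rt i0 [] hf, pvLoopA_acc]
        simp only [List.nil_append, List.singleton_append]
        rw [pvBuildA_cons_eq]
        have hi1 : i - 1 + 1 = i := by omega
        rw [hi1]
        simp only [Nat.sub_self, List.take_zero, List.nil_append]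
        rw [pvBuildA_cons w c rt _ i hr.symm]
        · rw [(ih (i+1) i0 hrt).1]
          simp [pvRender, hf]
        · rcases hps : pvLoopA rt w.length (i+1) 0 i0 [] with _ | ⟨⟨a, b⟩, l⟩
          · exact Or.inl rfl
          · exact Or.inr ⟨a, b, l, rfl, by
              have := (pvLoopA_head_ge rt w.length (i+1) i0 a b l).1 hps
              omega⟩

theorem pvRender_true_eq (r : List Char) :
    pvRender true r = pvRender false (r.dropWhile pvIsFloat) := by
  induction r with
  | nil => rfl
  | cons c r ih =>
    by_cases hf : pvIsFloat c
    · simp [pvRender, hf, ih]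
    · simp [pvRender, hf]

theorem pvRender_false_prefix (r : List Char) :
    pvRender false r =
      r.takeWhile (fun x => !pvIsFloat x) ++ pvRender false (r.dropWhile (fun x => !pvIsFloat x)) := by
  induction r with
  | nil => rfl
  | cons c r ih =>
    by_cases hf : pvIsFloat c
    · simp [pvRender, hf]
    · simp only [pvRender, if_neg hf, List.takeWhile_cons, List.dropWhile_cons]
      simp [hf, ih]

theorem pvMainB : ∀ (n : Nat) (cs : List Char), cs.length ≤ n →
    (pvGroupRuns cs).flatMap (fun kg => if kg.1 then pvNUMBER else kg.2) = pvRender false cs := by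
  intro n
  induction n with
  | zero =>
    intro cs h
    have hcs : cs = [] := List.length_eq_zero_iff.mp (by omega)
    subst hcs
    simp [pvGroupRuns, pvRender]
  | succ n ih =>
    intro cs h
    match cs with
    | [] => simp [pvGroupRuns, pvRender]
    | c :: r =>
      rw [pvGroupRuns]
      by_cases hf : pvIsFloat c
      · have hp : (fun x => pvIsFloat x == pvIsFloat c) = pvIsFloat := by
          funext x; simp [hf]
        rw [hp]
        simp only [List.flatMap_cons]
        rw [ih (r.dropWhile pvIsFloat) (le_trans (List.length_dropWhile_le _ _) (by simpa using h))]
        simp [pvRender, hf, pvRender_true_eq]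
      · have hp : (fun x => pvIsFloat x == pvIsFloat c) = (fun x => !pvIsFloat x) := by
          funext x; simp [Bool.eq_false_iff.mpr hf]
        rw [hp]
        simp only [List.flatMap_cons]
        rw [ih (r.dropWhile (fun x => !pvIsFloat x))
          (le_trans (List.length_dropWhile_le _ _) (by simpa using h))]
        simp only [pvRender, if_neg hf]
        rw [pvRender_false_prefix r]
        simp

theorem pvWordProcess_eq (s : String) : pvWordProcessA s = pvWordProcessB s := by
  unfold pvWordProcessA pvWordProcessB
  by_cases hg : s.toList.length = 1 ∧ ¬ PySem.Str.strIsdigit s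
  · rw [if_pos hg, if_pos hg]
  · rw [if_neg hg, if_neg hg]
    congr 1
    rw [(pvMainA s.toList s.toList 0 0 rfl).1,
        pvMainB s.toList.length s.toList le_rfl]

theorem pvStep_eq (dc : PySem.Dict String Int × Int) (w : List String) (hw : ¬ w.isEmpty = true) :
    pvStepA dc (pvWordProcessA (PySem.Str.lower ((PySem.List.pyGet? w 2).getD ""))) = pvStepB dc w := by
  unfold pvStepA pvStepB
  rw [if_neg hw, pvWordProcess_eq]
  rw [PySem.Dict.contains_eq_isSome_get?]
  rcases h : (dc.1.get? (pvWordProcessB (PySem.Str.lower ((PySem.List.pyGet? w 2).getD "")))) with _ | v <;> simp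

theorem pvInner_eq (ds : List (List String)) : ∀ dc,
    ((ds.filter (fun w => !w.isEmpty)).map
      (fun w => pvWordProcessA (PySem.Str.lower ((PySem.List.pyGet? w 2).getD "")))).foldl pvStepA dc
    = ds.foldl pvStepB dc := by
  induction ds with
  | nil => intro dc; rfl
  | cons w ds ih =>
    intro dc
    by_cases hw : w.isEmpty = true
    · rw [List.filter_cons_of_neg (by simp [hw])]
      rw [List.foldl_cons, show pvStepB dc w = dc from by unfold pvStepB; rw [if_pos hw]]
      exact ih dc
    · rw [List.filter_cons_of_pos (by simp [hw])]
      simp only [List.map_cons, List.foldl_cons]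
      rw [pvStep_eq dc w hw]
      exact ih _

theorem pvOuter_eq (data : List (List (List String))) : ∀ (acc : List String) dc,
    (data.foldl
      (fun acc ds => acc ++ (ds.filter (fun w => !w.isEmpty)).map
        (fun w => pvWordProcessA (PySem.Str.lower ((PySem.List.pyGet? w 2).getD ""))))
      acc).foldl pvStepA dc
    = data.foldl (fun dc ds => ds.foldl pvStepB dc) (acc.foldl pvStepA dc) := by
  induction data with
  | nil => intro acc dc; rfl
  | cons ds data ih =>
    intro acc dc
    simp only [List.foldl_cons]
    rw [ih]
    rw [List.foldl_append, pvInner_eq]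

-- ===== VERDICT (by name: the statement is the Claim_ definition above) =====
theorem gen_dictionary_spec : Claim_equal_gen_dictionary := by
  intro data _ _
  unfold Spec_gen_dictionary gen_dictionary gen_dictionary_alt
  have h := pvOuter_eq data [] (PySem.Dict.empty, 2)
  simp only [List.foldl_nil] at h
  rw [h]
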